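-- pv_equiv track=rewrite | github.com/mammalwithashell/scott-heyman-gcp-functions | Gmail_API_Lib.py | last_cleaner
-- ===== SOURCE A (Python) =====
-- def last_cleaner(msg_info_array, unit_name):
--     unit_name_comp = ''.join(unit_name.split()).lower()
--     cleaner_keyword = "CLEANER"
--     cleaner_keyword = ''.join(cleaner_keyword.split()).lower() #remove whitespace and change to lowercase
--     inspector_keyword = "INSPECTOR"
--     inspector_keyword = ''.join(inspector_keyword.split()).lower() #remove whitespace and change to lowercase
--     _last_cleaner = None
--     last_person = None
--     date = ""
--     for i in range(len(msg_info_array)):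
--         if (unit_name_comp in ''.join(msg_info_array[i]['subject'].split()).lower()):
--             if last_person == None:
--                 last_person = msg_info_array[i]['subject'].split('by')[1].strip()
--                 date = msg_info_array[i]['date']
--             if ((cleaner_keyword in ''.join(msg_info_array[i]['subject'].split()).lower())):
--                 if ('CLEANER' in msg_info_array[i]['subject']):
--                     _last_cleaner = msg_info_array[i]['subject'].split('CLEANER')[1].strip()
--                 elif ('Cleaner' in msg_info_array[i]['subject']):
--                     _last_cleaner = msg_info_array[i]['subject'].split('Cleaner')[1].strip()
--                 else:
--                     _last_cleaner = msg_info_array[i]['subject'].split('cleaner')[1].strip()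
--                 date = msg_info_array[i]['date']
--                 break
--             elif (inspector_keyword in ''.join(msg_info_array[i]['subject'].split()).lower()):
--                 if ('INSPECTOR' in msg_info_array[i]['subject']):
--                     _last_cleaner = msg_info_array[i]['subject'].split('INSPECTOR')[1].strip()
--                 elif ('Inspector' in msg_info_array[i]['subject']):
--                     _last_cleaner = msg_info_array[i]['subject'].split('Inspector')[1].strip()
--                 else:
--                     _last_cleaner = msg_info_array[i]['subject'].split('inspector')[1].strip()
--                 date = msg_info_array[i]['date']
--                 break
--     if (_last_cleaner != None):
--         string = unit_name + ": Cleaner/Inspector - " + _last_cleaner + " on " + date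
--     elif (last_person != None):
--         string =  unit_name + ": NO CLEANER/INSPECTOR. Last person was " + last_person + " on: " + date
--     else:
--         date = msg_info_array[-1]['date']
--         string = unit_name + ": NO CLEANER/INSPECTOR. " + "Not a single person since: " + date
--     return string
-- ===== SOURCE B (Python) =====
-- def last_cleaner(msg_info_array, unit_name):
--     def comp(s):
--         return ''.join(s.split()).lower()
--
--     unit = comp(unit_name)
--
--     hit = next((m for m in msg_info_array
--                 if unit in comp(m['subject'])
--                 and ('cleaner' in comp(m['subject']) or 'inspector' in comp(m['subject']))),
--                None)
--     if hit is not None: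
--         s = hit['subject']
--         if 'cleaner' in comp(s):
--             kw = 'CLEANER' if 'CLEANER' in s else ('Cleaner' if 'Cleaner' in s else 'cleaner')
--         else:
--             kw = 'INSPECTOR' if 'INSPECTOR' in s else ('Inspector' if 'Inspector' in s else 'inspector')
--         return (unit_name + ": Cleaner/Inspector - " + s.split(kw)[1].strip()
--                 + " on " + hit['date'])
--
--     first = next((m for m in msg_info_array if unit in comp(m['subject'])), None)
--     if first is not None:
--         return (unit_name + ": NO CLEANER/INSPECTOR. Last person was "
--                 + first['subject'].split('by')[1].strip() + " on: " + first['date'])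
--
--     return (unit_name + ": NO CLEANER/INSPECTOR. Not a single person since: "
--             + msg_info_array[-1]['date'])
-- ===== Notes on version B (the rewrite author's own statement) =====
-- stated objective: simpler
-- what changed: Replaces A's single stateful break-loop (mutating last_person/date across iterations with an in-loop three-way keyword branch) by two independent first-match searches -- one for the first unit-matching message, one for the first unit-matching cleaner/inspector message -- followed by a flat three-way message build.
import Mathlib
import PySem

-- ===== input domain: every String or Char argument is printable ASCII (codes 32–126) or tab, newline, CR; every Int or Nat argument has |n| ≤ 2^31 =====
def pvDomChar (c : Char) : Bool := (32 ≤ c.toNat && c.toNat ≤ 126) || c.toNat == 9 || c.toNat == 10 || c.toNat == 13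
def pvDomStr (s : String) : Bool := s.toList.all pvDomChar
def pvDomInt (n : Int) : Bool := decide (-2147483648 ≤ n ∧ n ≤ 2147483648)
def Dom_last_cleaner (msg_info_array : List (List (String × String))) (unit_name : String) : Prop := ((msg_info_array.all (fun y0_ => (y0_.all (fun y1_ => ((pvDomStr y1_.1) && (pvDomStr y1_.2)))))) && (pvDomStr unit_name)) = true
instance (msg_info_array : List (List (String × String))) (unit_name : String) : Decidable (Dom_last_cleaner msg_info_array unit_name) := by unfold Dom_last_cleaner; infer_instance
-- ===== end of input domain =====

-- B replaces A's single stateful break-loop with two independent first-match searches and a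
-- three-way message build (objective: simpler decomposition; same return value, same complexity).

-- shared helpers: the literal Python expressions both versions use
-- ''.join(s.split()).lower()
def pvComp (s : String) : String :=
  PySem.Str.lower (PySem.Str.join "" (PySem.Str.split₀ s))

-- m['subject'] / m['date'] (defaults never reached under Pre_, which requires the keys)
def pvSubj (m : List (String × String)) : String := PySem.Dict.getD (PySem.Dict.mk m) "subject" ""
def pvDate (m : List (String × String)) : String := PySem.Dict.getD (PySem.Dict.mk m) "date" ""

-- subject.split(sep)[1].strip() (the [1] exists under Pre_ at every element where it is evaluated)
def pvSplit1 (s sep : String) : String :=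
  PySem.Str.strip (PySem.List.pyGetD ((PySem.Str.split? s sep).getD []) 1 "")

-- subject.split('by')[1].strip()
def pvByName (m : List (String × String)) : String := pvSplit1 (pvSubj m) "by"

-- unit_name_comp in ''.join(subject.split()).lower()
def pvUnitMatch (u : String) (m : List (String × String)) : Bool :=
  PySem.Str.isIn u (pvComp (pvSubj m))

-- cleaner_keyword / inspector_keyword in ''.join(subject.split()).lower()
def pvHasCl (m : List (String × String)) : Bool :=
  PySem.Str.isIn "cleaner" (pvComp (pvSubj m))
def pvHasIn (m : List (String × String)) : Bool :=
  PySem.Str.isIn "inspector" (pvComp (pvSubj m))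

-- ===== PORT A =====
-- A's for-loop with early break, as structural recursion over the same state
-- (last_person, date); returns (_last_cleaner, last_person, date) at loop exit.
def pvALoop (u : String) (xs : List (List (String × String)))
    (lastPerson : Option String) (date : String) :
    Option String × Option String × String :=
  match xs with
  | [] => (none, lastPerson, date)
  | m :: rest =>
    if pvUnitMatch u m then
      let lastPerson' := if lastPerson = none then some (pvByName m) else lastPerson
      let date' := if lastPerson = none then pvDate m else date
      if pvHasCl m then
        let c :=
          if PySem.Str.isIn "CLEANER" (pvSubj m) then pvSplit1 (pvSubj m) "CLEANER"
          else if PySem.Str.isIn "Cleaner" (pvSubj m) then pvSplit1 (pvSubj m) "Cleaner"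
          else pvSplit1 (pvSubj m) "cleaner"
        (some c, lastPerson', pvDate m)
      else if pvHasIn m then
        let c :=
          if PySem.Str.isIn "INSPECTOR" (pvSubj m) then pvSplit1 (pvSubj m) "INSPECTOR"
          else if PySem.Str.isIn "Inspector" (pvSubj m) then pvSplit1 (pvSubj m) "Inspector"
          else pvSplit1 (pvSubj m) "inspector"
        (some c, lastPerson', pvDate m)
      else pvALoop u rest lastPerson' date'
    else pvALoop u rest lastPerson date

def last_cleaner (msg_info_array : List (List (String × String))) (unit_name : String) : String :=
  let u := pvComp unit_name
  let r := pvALoop u msg_info_array none ""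
  match r.1 with
  | some c => unit_name ++ ": Cleaner/Inspector - " ++ c ++ " on " ++ r.2.2
  | none =>
    match r.2.1 with
    | some p => unit_name ++ ": NO CLEANER/INSPECTOR. Last person was " ++ p ++ " on: " ++ r.2.2
    | none => unit_name ++ ": NO CLEANER/INSPECTOR. Not a single person since: "
                ++ pvDate (PySem.List.pyGetD msg_info_array (-1) [])

-- ===== PORT B =====
-- 'cleaner' in comp(subject) or 'inspector' in comp(subject)
def pvHasKw (m : List (String × String)) : Bool := pvHasCl m || pvHasIn m

-- pick the correctly-cased keyword, then subject.split(kw)[1].strip()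
def pvExtract (m : List (String × String)) : String :=
  let s := pvSubj m
  let kw :=
    if pvHasCl m then
      if PySem.Str.isIn "CLEANER" s then "CLEANER"
      else if PySem.Str.isIn "Cleaner" s then "Cleaner"
      else "cleaner"
    else
      if PySem.Str.isIn "INSPECTOR" s then "INSPECTOR"
      else if PySem.Str.isIn "Inspector" s then "Inspector"
      else "inspector"
  pvSplit1 s kw

def last_cleaner_alt (msg_info_array : List (List (String × String))) (unit_name : String) : String :=
  let u := pvComp unit_name
  match msg_info_array.find? (fun m => pvUnitMatch u m && pvHasKw m) with
  | some hit =>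
      unit_name ++ ": Cleaner/Inspector - " ++ pvExtract hit ++ " on " ++ pvDate hit
  | none =>
    match msg_info_array.find? (fun m => pvUnitMatch u m) with
    | some first =>
        unit_name ++ ": NO CLEANER/INSPECTOR. Last person was " ++ pvByName first
          ++ " on: " ++ pvDate first
    | none =>
        unit_name ++ ": NO CLEANER/INSPECTOR. Not a single person since: "
          ++ pvDate (PySem.List.pyGetD msg_info_array (-1) [])

-- ===== PRECONDITION & SPEC =====
-- the keyword found at the break element must occur in the subject in one of the three literal casings
def pvCasingOk (m : List (String × String)) : Bool :=
  if pvHasCl m then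
    PySem.Str.isIn "CLEANER" (pvSubj m) || PySem.Str.isIn "Cleaner" (pvSubj m)
      || PySem.Str.isIn "cleaner" (pvSubj m)
  else
    PySem.Str.isIn "INSPECTOR" (pvSubj m) || PySem.Str.isIn "Inspector" (pvSubj m)
      || PySem.Str.isIn "inspector" (pvSubj m)

-- Pre_ excludes exactly A's raise paths, following A's reads: a missing 'subject' key on any element
-- up to the break element (KeyError), 'by' absent or 'date' missing at the first unit-matching element
-- (IndexError/KeyError), casing or 'date' missing at the break element, and the empty/no-'date'-last
-- list when nothing matches (IndexError/KeyError); elements A never reads are unconstrained.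
def Pre_last_cleaner (msg_info_array : List (List (String × String))) (unit_name : String) : Prop :=
  ((match msg_info_array.find? (fun m => pvUnitMatch (pvComp unit_name) m && pvHasKw m) with
    | some k =>
        (msg_info_array.takeWhile
            (fun m => !(pvUnitMatch (pvComp unit_name) m && pvHasKw m))).all
          (fun m => PySem.Dict.contains (PySem.Dict.mk m) "subject") &&
        PySem.Dict.contains (PySem.Dict.mk k) "subject" &&
        PySem.Dict.contains (PySem.Dict.mk k) "date" && pvCasingOk k &&
        (match msg_info_array.find? (fun m => pvUnitMatch (pvComp unit_name) m) with
         | some j => PySem.Str.isIn "by" (pvSubj j) && PySem.Dict.contains (PySem.Dict.mk j) "date"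
         | none => true)
    | none =>
        msg_info_array.all (fun m => PySem.Dict.contains (PySem.Dict.mk m) "subject") &&
        (match msg_info_array.find? (fun m => pvUnitMatch (pvComp unit_name) m) with
         | some j => PySem.Str.isIn "by" (pvSubj j) && PySem.Dict.contains (PySem.Dict.mk j) "date"
         | none =>
            !msg_info_array.isEmpty &&
            PySem.Dict.contains (PySem.Dict.mk (PySem.List.pyGetD msg_info_array (-1) [])) "date"))
    = true)

instance (msg_info_array : List (List (String × String))) (unit_name : String) :
    Decidable (Pre_last_cleaner msg_info_array unit_name) := by
  unfold Pre_last_cleaner; infer_instance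

def pvWitness_last_cleaner : (List (List (String × String))) × String :=
  ([[("subject", "u1 CLEANER by bob"), ("date", "d1")]], "u1")

def Spec_last_cleaner (msg_info_array : List (List (String × String))) (unit_name : String) (out : String) : Prop := out = last_cleaner_alt msg_info_array unit_name
instance (msg_info_array : List (List (String × String))) (unit_name : String) (out : String) : Decidable (Spec_last_cleaner msg_info_array unit_name out) := by unfold Spec_last_cleaner; infer_instance

-- ===== CLAIM (what is proved, stated in full; the proofs are below) =====
def Claim_equal_last_cleaner : Prop := ∀ (msg_info_array : List (List (String × String))) (unit_name : String), Dom_last_cleaner msg_info_array unit_name → Pre_last_cleaner msg_info_array unit_name → Spec_last_cleaner msg_info_array unit_name (last_cleaner msg_info_array unit_name)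

-- ===== LEMMAS AND PROOFS =====

-- A's break value equals B's pvExtract in each keyword branch
theorem pvExtract_cleaner (m : List (String × String)) (hc : pvHasCl m = true) :
    (if PySem.Str.isIn "CLEANER" (pvSubj m) then pvSplit1 (pvSubj m) "CLEANER"
      else if PySem.Str.isIn "Cleaner" (pvSubj m) then pvSplit1 (pvSubj m) "Cleaner"
      else pvSplit1 (pvSubj m) "cleaner") = pvExtract m := by
  simp only [pvExtract, hc, if_true]
  split_ifs <;> rfl

theorem pvExtract_inspector (m : List (String × String)) (hc : pvHasCl m = false) :
    (if PySem.Str.isIn "INSPECTOR" (pvSubj m) then pvSplit1 (pvSubj m) "INSPECTOR"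
      else if PySem.Str.isIn "Inspector" (pvSubj m) then pvSplit1 (pvSubj m) "Inspector"
      else pvSplit1 (pvSubj m) "inspector") = pvExtract m := by
  simp only [pvExtract, hc, Bool.false_eq_true, if_false]
  split_ifs <;> rfl

-- A's loop once last_person is set: the result is determined by the first keyword hit
theorem pvALoop_some (u p : String) (xs : List (List (String × String))) (d : String) :
    pvALoop u xs (some p) d =
      match xs.find? (fun m => pvUnitMatch u m && pvHasKw m) with
      | some k => (some (pvExtract k), some p, pvDate k)
      | none => (none, some p, d) := by
  induction xs generalizing d with
  | nil => rfl
  | cons m rest ih =>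
    by_cases hP : pvUnitMatch u m = true
    · by_cases hc : pvHasCl m = true
      · simp [pvALoop, pvHasKw, hP, hc]
        simpa using pvExtract_cleaner m hc
      · rw [Bool.not_eq_true] at hc
        by_cases hi : pvHasIn m = true
        · simp [pvALoop, pvHasKw, hP, hc, hi]
          simpa using pvExtract_inspector m hc
        · rw [Bool.not_eq_true] at hi
          simp [pvALoop, pvHasKw, hP, hc, hi, ih]
    · rw [Bool.not_eq_true] at hP
      simp [pvALoop, hP, ih]

-- A's loop from the initial state, componentwise against B's two searches
theorem pvALoop_none (u : String) (xs : List (List (String × String))) (d : String) :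
    ((pvALoop u xs none d).1 =
        (match xs.find? (fun m => pvUnitMatch u m && pvHasKw m) with
         | some k => some (pvExtract k)
         | none => none)) ∧
    (xs.find? (fun m => pvUnitMatch u m && pvHasKw m) = none →
       (pvALoop u xs none d).2 =
        (match xs.find? (fun m => pvUnitMatch u m) with
         | some j => (some (pvByName j), pvDate j)
         | none => (none, d))) ∧
    (∀ k, xs.find? (fun m => pvUnitMatch u m && pvHasKw m) = some k →
       (pvALoop u xs none d).2.2 = pvDate k) := by
  induction xs generalizing d with
  | nil => simp [pvALoop]
  | cons m rest ih =>
    by_cases hP : pvUnitMatch u m = true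
    · by_cases hc : pvHasCl m = true
      · simp [pvALoop, pvHasKw, hP, hc]
        simpa using pvExtract_cleaner m hc
      · rw [Bool.not_eq_true] at hc
        by_cases hi : pvHasIn m = true
        · simp [pvALoop, pvHasKw, hP, hc, hi]
          simpa using pvExtract_inspector m hc
        · rw [Bool.not_eq_true] at hi
          have hkw : (pvUnitMatch u m && pvHasKw m) = false := by simp [pvHasKw, hc, hi]
          have hs := pvALoop_some u (pvByName m) rest (pvDate m)
          rw [List.find?_cons_of_neg (by simp [hkw]), List.find?_cons_of_pos hP]
          simp only [pvALoop, hP, hc, hi, if_true, Bool.false_eq_true, if_false, hs]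
          cases hfk : rest.find? (fun m => pvUnitMatch u m && pvHasKw m) with
          | some k => simp
          | none => simp
    · rw [Bool.not_eq_true] at hP
      have := ih d
      simpa [pvALoop, List.find?_cons, hP] using this

-- ===== VERDICT (by name: the statement is the Claim_ definition above) =====
theorem last_cleaner_spec : Claim_equal_last_cleaner := by
  intro msgs unit_name _hDom _hPre
  unfold Spec_last_cleaner last_cleaner last_cleaner_alt
  obtain ⟨h1, h2, h3⟩ := pvALoop_none (pvComp unit_name) msgs ""
  cases hfk : msgs.find? (fun m => pvUnitMatch (pvComp unit_name) m && pvHasKw m) with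
  | some k =>
    have hd := h3 k hfk
    rw [hfk] at h1
    simp only [hfk, h1, hd]
  | none =>
    have h2' := h2 hfk
    rw [hfk] at h1
    cases hfp : msgs.find? (fun m => pvUnitMatch (pvComp unit_name) m) with
    | some j =>
      rw [hfp] at h2'
      simp only [hfk, hfp, h1, h2']
    | none =>
      rw [hfp] at h2'
      simp only [hfk, hfp, h1, h2']
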